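-- pv_equiv track=rewrite | github.com/ydchen17/AY20_MBDS_questions | .history/Question 1/q1_test_20210306145517.py | path2sum
-- ===== SOURCE A (Python) =====
-- def path2sum(path):
--     index = 1
--     finalsum = 0
--     for i in str(path):
--         if i == "R":
--             finalsum += index
--         else:
--             finalsum += index
--             index += 1
--     return finalsum+index
-- ===== SOURCE B (Python) =====
-- def path2sum(path):
--     s = str(path)
--     n = len(s)
--     total = n + 1
--     for j, c in enumerate(s):
--         if c != "R":
--             total += n - j
--     return total
-- ===== Notes on version B (the rewrite author's own statement) =====
-- stated objective: alternative
-- what changed: B replaces A's running index-counter accumulator with a positional-contribution sum: total starts at len(s)+1 and each non-'R' character at position j adds its full downstream effect n-j directly.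
import Mathlib
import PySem

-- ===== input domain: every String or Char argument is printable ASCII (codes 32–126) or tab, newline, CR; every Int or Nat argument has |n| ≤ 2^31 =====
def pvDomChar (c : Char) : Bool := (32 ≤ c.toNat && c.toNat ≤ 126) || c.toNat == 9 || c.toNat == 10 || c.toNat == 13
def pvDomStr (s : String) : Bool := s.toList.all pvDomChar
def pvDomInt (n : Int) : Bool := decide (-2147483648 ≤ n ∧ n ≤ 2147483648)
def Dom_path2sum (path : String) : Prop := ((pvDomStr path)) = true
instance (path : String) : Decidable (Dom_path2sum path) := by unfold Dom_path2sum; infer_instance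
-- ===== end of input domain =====

-- B replaces A's running index-counter accumulator with a positional-contribution sum
-- (total = n+1 plus, for each non-'R' character at position j, its downstream effect n-j).

-- ===== PORT A =====
-- state (index, finalsum), exactly A's loop
def path2sum (path : String) : Int :=
  let st := path.toList.foldl
    (fun (st : Int × Int) (i : Char) =>
      if i == 'R' then (st.1, st.2 + st.1) else (st.1 + 1, st.2 + st.1))
    (1, 0)
  st.2 + st.1

-- ===== PORT B =====
def path2sum_alt (path : String) : Int :=
  let s := path.toList
  let n : Int := s.length
  (PySem.List.enumerate s).foldl
    (fun (total : Int) (jc : Int × Char) =>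
      if jc.2 ≠ 'R' then total + (n - jc.1) else total)
    (n + 1)

-- ===== PRECONDITION & SPEC =====
def Spec_path2sum (path : String) (out : Int) : Prop := out = path2sum_alt path
instance (path : String) (out : Int) : Decidable (Spec_path2sum path out) := by unfold Spec_path2sum; infer_instance

-- ===== CLAIM (what is proved, stated in full; the proofs are below) =====
def Claim_equal_path2sum : Prop := ∀ (path : String), Dom_path2sum path → Spec_path2sum path (path2sum path)

-- ===== LEMMAS AND PROOFS =====
def pvCnt : List Char → Int
  | [] => 0
  | x :: xs => (if x = 'R' then 0 else 1) + pvCnt xs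

def pvW : List Char → Int
  | [] => 0
  | x :: xs => (if x = 'R' then 0 else (xs.length : Int)) + pvW xs

def pvV (n : Int) : List Char → Int → Int
  | [], _ => 0
  | x :: xs, k => (if x = 'R' then 0 else n - k) + pvV n xs (k + 1)

lemma foldA_eq (l : List Char) (a b : Int) :
    l.foldl (fun (st : Int × Int) (i : Char) =>
      if i == 'R' then (st.1, st.2 + st.1) else (st.1 + 1, st.2 + st.1)) (a, b)
      = (a + pvCnt l, b + a * l.length + pvW l) := by
  induction l generalizing a b with
  | nil => simp [pvCnt, pvW]
  | cons x xs ih =>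
    rw [List.foldl_cons]
    by_cases h : x = 'R'
    · rw [if_pos (by simp [h]), ih]
      refine Prod.ext ?_ ?_ <;> simp [pvCnt, pvW, h] <;> push_cast <;> ring
    · rw [if_neg (by simp [h]), ih]
      refine Prod.ext ?_ ?_ <;> simp [pvCnt, pvW, h] <;> push_cast <;> ring

lemma foldB_eq (n : Int) (l : List Char) (k t : Int) :
    (PySem.List.enumerate l k).foldl
      (fun (total : Int) (jc : Int × Char) =>
        if jc.2 ≠ 'R' then total + (n - jc.1) else total) t
      = t + pvV n l k := by
  induction l generalizing k t with
  | nil => simp [PySem.List.enumerate_nil, pvV]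
  | cons x xs ih =>
    rw [PySem.List.enumerate_cons, List.foldl_cons]
    by_cases h : x = 'R'
    · rw [if_neg (by simp [h]), ih]
      simp [pvV, h]
    · rw [if_pos (by simp [h]), ih]
      simp [pvV, h]; ring

lemma pvV_eq (l : List Char) (n k : Int) (h : n - k = l.length) :
    pvV n l k = pvW l + pvCnt l := by
  induction l generalizing k with
  | nil => simp [pvV, pvW, pvCnt]
  | cons x xs ih =>
    have hx : n - (k + 1) = (xs.length : Int) := by
      simp at h; push_cast at h ⊢; omega
    by_cases hR : x = 'R' <;>
      simp [pvV, hR, pvW, pvCnt, ih _ hx] <;> push_cast at h ⊢ <;> omega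

-- ===== VERDICT (by name: the statement is the Claim_ definition above) =====
theorem path2sum_spec : Claim_equal_path2sum := by
  intro path _
  unfold Spec_path2sum path2sum path2sum_alt
  rw [foldA_eq, foldB_eq, pvV_eq _ _ _ (by simp)]
  ring
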